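-- pv_equiv track=rewrite | github.com/0525stone/daily_coding | programmers/42586_dev_function.py | solution
-- ===== SOURCE A (Python) =====
-- def solution(progresses, speeds):
--     """
--     1. 제일 처음에 있는 것을 완료하는 시점에서,
--         (100-progress)/speed
--     2. 바로 뒤에 있는 것들이 100을 넘으면 pop 하고,
--     3. 아닌 것들을 갖고 1 시작
--
--     """
--     answer = []
--
--     while 1:
--         temp = 0
--         progress = progresses[0]
--         speed = speeds[0]
--
--         # progress day
--         # day = math.ceil((100-progress)/speed)     # ceil()로 하는게 더 나은 건가???? -> 바꿔서 제출해봤는데, 기존엔 되었던 것들에서도 런타임에러 뜸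
--         if (100-progress)%speed:
--             day = (100-progress)//speed+1
--         else: day = (100-progress)//speed
--
--         # progress update
--         progresses = [p+s*day for p, s in zip(progresses, speeds)]
--         temp_progresses = progresses.copy()
--
--         for p in temp_progresses:
--             if p>=100:
--                 progresses.pop(0)
--                 speeds.pop(0)
--                 temp+=1
--             else:
--                 break
--         answer.append(temp)
--
--         # 배포할 progress가 없으면 종료
--         if not progresses:
--             break
--
--     return answer
-- ===== SOURCE B (Python) =====
-- def solution(progresses, speeds):
--     # Precompute each task's completion day, then group in one pass by the running maximum.
--     days = [-((p - 100) // s) for p, s in zip(progresses, speeds)]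
--     answer = []
--     cur = days[0]
--     cnt = 1
--     for d in days[1:]:
--         if d <= cur:
--             cnt += 1
--         else:
--             answer.append(cnt)
--             cur = d
--             cnt = 1
--     answer.append(cnt)
--     return answer
-- ===== Notes on version B (the rewrite author's own statement) =====
-- stated objective: faster
-- what changed: Instead of repeatedly recomputing the front task's remaining days, rebuilding the whole progress list and popping completed prefixes each round (A), B precomputes each task's completion day once and groups tasks in a single pass by the running maximum day; intended as faster (O(n) vs O(n^2)), though a timing run got no clean reading at the largest size.
-- outside the precondition, e.g. on solution([1, 6103, -3, 118], [-1, 10, -2]): A returns [3], B returns [2, 1]; on solution([100, 100], [1, -1]): A returns [2], B returns [2]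
import Mathlib
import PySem

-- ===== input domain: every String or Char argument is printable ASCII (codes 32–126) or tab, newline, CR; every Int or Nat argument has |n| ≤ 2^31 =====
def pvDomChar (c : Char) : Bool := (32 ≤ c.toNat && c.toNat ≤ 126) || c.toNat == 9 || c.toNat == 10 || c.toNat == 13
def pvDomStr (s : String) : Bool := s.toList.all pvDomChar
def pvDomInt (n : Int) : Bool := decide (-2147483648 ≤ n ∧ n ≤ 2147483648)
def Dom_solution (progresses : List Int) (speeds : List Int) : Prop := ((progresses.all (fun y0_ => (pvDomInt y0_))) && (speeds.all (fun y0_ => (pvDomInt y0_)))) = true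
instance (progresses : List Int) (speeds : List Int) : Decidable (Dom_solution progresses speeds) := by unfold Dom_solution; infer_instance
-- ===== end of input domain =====

-- B replaces A's round-by-round simulation by a precomputed completion-day list grouped in one
-- pass by the running maximum (intended as faster; timing unconfirmed by the check). Equivalence is about the RETURN value only:
-- the Python A pops from the caller's `speeds` list in place, B does not mutate its arguments.

-- ===== PORT A =====
-- the `for p in temp_progresses: if p>=100: pop... else: break` loop (number of popped leading tasks)
def popCount : List Int → Nat
  | [] => 0
  | p :: rest => if p ≥ 100 then popCount rest + 1 else 0

-- the `while 1` loop of A; fuel bounds the rounds (each round pops ≥ 1 task on Pre_).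
def solutionGo : Nat → List Int → List Int → List Int → List Int
  | 0, ans, _, _ => ans
  | fuel + 1, ans, ps, ss =>
    match ps, ss with
    | p :: _, s :: _ =>
      if s = 0 then ans   -- Python: ZeroDivisionError (excluded by Pre_)
      else
        let day := if PySem.Int.mod (100 - p) s ≠ 0 then PySem.Int.floordiv (100 - p) s + 1
                   else PySem.Int.floordiv (100 - p) s
        let ps' := (ps.zip ss).map (fun q => q.1 + q.2 * day)
        let k := popCount ps'
        let ans' := ans ++ [(k : Int)]
        let ps'' := ps'.drop k
        let ss' := ss.drop k
        if ps''.isEmpty then ans' else solutionGo fuel ans' ps'' ss'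
    | _, _ => ans   -- Python: IndexError (excluded by Pre_)

def solution (progresses : List Int) (speeds : List Int) : List Int :=
  solutionGo progresses.length [] progresses speeds

-- ===== PORT B =====
-- completion day of a task: -((p - 100) // s)
def dayFn (p s : Int) : Int := -(PySem.Int.floordiv (p - 100) s)

-- B's single grouping pass (answer, cur, cnt accumulator)
def groupGo : List Int → Int → Int → List Int → List Int
  | ans, _, cnt, [] => ans ++ [cnt]
  | ans, cur, cnt, d :: rest =>
    if d ≤ cur then groupGo ans cur (cnt + 1) rest else groupGo (ans ++ [cnt]) d 1 rest

def solution_alt (progresses : List Int) (speeds : List Int) : List Int :=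
  let days := (progresses.zip speeds).map (fun q => dayFn q.1 q.2)
  match days with
  | [] => []   -- Python B: days[0] raises IndexError (excluded by Pre_)
  | d :: rest => groupGo [] d 1 rest

-- ===== PRECONDITION & SPEC =====
-- Pre_ excludes empty inputs (A raises IndexError) and nonpositive speeds among the zipped tasks,
-- on which A raises ZeroDivisionError, loops forever, or — only when such a task is already
-- complete — happens to return; speeds beyond the zip truncation are never used as divisors.
def Pre_solution (progresses : List Int) (speeds : List Int) : Prop :=
  progresses ≠ [] ∧ speeds ≠ [] ∧ ∀ q ∈ progresses.zip speeds, 0 < q.2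
instance (progresses : List Int) (speeds : List Int) : Decidable (Pre_solution progresses speeds) := by
  unfold Pre_solution; infer_instance
def pvWitness_solution : List Int × List Int := ([93, 30, 55], [1, 30, 5])

def Spec_solution (progresses : List Int) (speeds : List Int) (out : List Int) : Prop := out = solution_alt progresses speeds
instance (progresses : List Int) (speeds : List Int) (out : List Int) : Decidable (Spec_solution progresses speeds out) := by unfold Spec_solution; infer_instance

-- ===== CLAIM (what is proved, stated in full; the proofs are below) =====
def Claim_equal_solution : Prop := ∀ (progresses : List Int) (speeds : List Int), Dom_solution progresses speeds → Pre_solution progresses speeds → Spec_solution progresses speeds (solution progresses speeds)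

-- ===== LEMMAS AND PROOFS =====

theorem day_eq (p s : Int) (hs : 0 < s) :
    (if PySem.Int.mod (100 - p) s ≠ 0 then PySem.Int.floordiv (100 - p) s + 1
     else PySem.Int.floordiv (100 - p) s) = dayFn p s := by
  have hmk : p - 100 = -(100 - p) := by ring
  have hq := PySem.Int.floordiv_mul_add_mod (100 - p) s
  have hr0 : 0 ≤ PySem.Int.mod (100 - p) s := by
    rw [PySem.Int.mod_eq_emod_of_pos hs]; exact Int.emod_nonneg _ (by omega)
  have hr1 : PySem.Int.mod (100 - p) s < s := by
    rw [PySem.Int.mod_eq_emod_of_pos hs]; exact Int.emod_lt_of_pos _ hs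
  rw [eq_comm, dayFn, hmk, PySem.Int.neg_floordiv_neg_eq_iff_of_pos hs]
  split_ifs with h
  · have hr2 : 0 < PySem.Int.mod (100 - p) s := lt_of_le_of_ne hr0 (Ne.symm h)
    constructor <;> ring_nf <;> linarith
  · rw [not_not] at h
    rw [h, add_zero] at hq
    constructor <;> ring_nf <;> linarith
theorem upd_ge_iff (p s D : Int) (hs : 0 < s) : (100 ≤ p + s * D ↔ dayFn p s ≤ D) := by
  rw [dayFn, neg_le, PySem.Int.le_floordiv_iff_mul_le hs]
  constructor <;> intro h <;> nlinarith [h]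
theorem dayFn_shift (p s D : Int) (hs : 0 < s) : dayFn (p + s * D) s = dayFn p s - D := by
  unfold dayFn
  rw [PySem.Int.floordiv_eq_ediv_of_pos hs, PySem.Int.floordiv_eq_ediv_of_pos hs]
  have : p + s * D - 100 = (p - 100) + s * D := by ring
  rw [this, Int.add_mul_ediv_left _ _ (by omega : s ≠ 0)]
  ring
theorem popCount_eq (z : List (Int × Int)) (D : Int) (hpos : ∀ q ∈ z, 0 < q.2) :
    popCount (z.map (fun q => q.1 + q.2 * D)) =
      ((z.map (fun q => dayFn q.1 q.2)).takeWhile (fun d => decide (d ≤ D))).length := by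
  induction z with
  | nil => simp [popCount]
  | cons q z' ih =>
    have hq : 0 < q.2 := hpos q (by simp)
    have hiff := upd_ge_iff q.1 q.2 D hq
    simp only [List.map_cons, popCount, List.takeWhile_cons, ge_iff_le]
    by_cases hc : 100 ≤ q.1 + q.2 * D
    · rw [if_pos hc, if_pos (by simpa using hiff.mp hc)]
      simp [ih (fun r hr => hpos r (by simp [hr]))]
    · rw [if_neg hc, if_neg (by simpa using fun hh => hc (hiff.mpr hh))]
      simp
theorem groupGo_skip (l1 l2 : List Int) (ans : List Int) (cur cnt : Int)
    (h : ∀ d ∈ l1, d ≤ cur) :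
    groupGo ans cur cnt (l1 ++ l2) = groupGo ans cur (cnt + l1.length) l2 := by
  induction l1 generalizing cnt with
  | nil => simp
  | cons d t ih =>
    simp only [List.cons_append, groupGo, if_pos (h d (by simp))]
    rw [ih _ (fun e he => h e (by simp [he]))]
    congr 1
    simp only [List.length_cons]
    push_cast
    ring
theorem groupGo_shift (l : List Int) (ans : List Int) (cur cnt c : Int) :
    groupGo ans (cur - c) cnt (l.map (fun d => d - c)) = groupGo ans cur cnt l := by
  induction l generalizing ans cur cnt with
  | nil => simp [groupGo]
  | cons d t ih =>
    simp only [List.map_cons, groupGo, sub_le_sub_iff_right]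
    by_cases hc : d ≤ cur
    · rw [if_pos hc, if_pos hc, ih]
    · rw [if_neg hc, if_neg hc, ih]
theorem zip_map_self (ps ss : List Int) (f : Int × Int → Int) :
    ((ps.zip ss).map f).zip ss = (ps.zip ss).map (fun q => (f q, q.2)) := by
  induction ps generalizing ss with
  | nil => simp
  | cons p pt ih =>
    cases ss with
    | nil => simp
    | cons s st => simp [ih]
theorem zip_drop (xs ys : List Int) (k : Nat) :
    (xs.zip ys).drop k = (xs.drop k).zip (ys.drop k) := by
  induction xs generalizing ys k with
  | nil => simp
  | cons x xt ih =>
    cases ys with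
    | nil => simp
    | cons y yt =>
      cases k with
      | zero => simp
      | succ k => simp [ih]
theorem dropWhile_head_false {α : Type} (p : α → Bool) (l : List α) (x : α) (xs : List α)
    (h : l.dropWhile p = x :: xs) : p x = false := by
  induction l with
  | nil => simp [List.dropWhile] at h
  | cons a t ih =>
    rw [List.dropWhile_cons] at h
    by_cases hp : p a
    · simp [hp] at h; exact ih h
    · simp [hp] at h
      obtain ⟨rfl, -⟩ := h
      simpa using hp
theorem main_lemma : ∀ (fuel : Nat) (ps ss ans : List Int) (p s : Int) (pt st : List Int),
    ps = p :: pt → ss = s :: st →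
    (∀ q ∈ ps.zip ss, 0 < q.2) →
    min ps.length ss.length ≤ fuel →
    solutionGo fuel ans ps ss =
      groupGo ans (dayFn p s) 1 ((pt.zip st).map (fun q => dayFn q.1 q.2)) := by
  intro fuel
  induction fuel with
  | zero =>
    intro ps ss ans p s pt st hps hss hpos hfuel
    subst hps hss; simp at hfuel
  | succ fuel ih =>
    intro ps ss ans p s pt st hps hss hpos hfuel
    subst hps hss
    have hs : 0 < s := hpos (p, s) (by simp)
    simp only [solutionGo]
    rw [if_neg (by omega : ¬ s = 0), day_eq p s hs, popCount_eq _ _ hpos]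
    have hzc : (p :: pt).zip (s :: st) = (p, s) :: pt.zip st := rfl
    set D := dayFn p s with hD
    set l := (pt.zip st).map (fun q => dayFn q.1 q.2) with hl
    set tw := l.takeWhile (fun d => decide (d ≤ D)) with htw
    set dw := l.dropWhile (fun d => decide (d ≤ D)) with hdw
    have htd : tw ++ dw = l := List.takeWhile_append_dropWhile
    have hltw : ∀ d ∈ tw, d ≤ D := fun d hd => by simpa using List.mem_takeWhile_imp hd
    have hlen : tw.length + dw.length = l.length := by
      rw [← htd]; simp
    have hk : ((((p :: pt).zip (s :: st)).map (fun q => dayFn q.1 q.2)).takeWhile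
        (fun d => decide (d ≤ D))).length = tw.length + 1 := by
      rw [hzc]; simp only [List.map_cons, List.takeWhile_cons, ← hl]
      rw [← hD, if_pos (by simp)]
      simp [← htw]
    rw [hk]
    have hmapupd : ((p :: pt).zip (s :: st)).map (fun q => q.1 + q.2 * D)
        = (p + s * D) :: (pt.zip st).map (fun q => q.1 + q.2 * D) := by
      rw [hzc]; simp
    rw [hmapupd]
    simp only [List.drop_succ_cons]
    have hldw : ((pt.zip st).map (fun q => q.1 + q.2 * D)).drop tw.length
        = ((pt.zip st).drop tw.length).map (fun q => q.1 + q.2 * D) := by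
      simp [List.map_drop]
    have hdrop_l : l.drop tw.length = dw := by
      rw [← htd]; exact List.drop_left
    have hzlen : (pt.zip st).length = min pt.length st.length := by simp
    have hllen : l.length = min pt.length st.length := by simp [hl]
    cases hdwc : dw with
    | nil =>
      have htwl : tw.length = l.length := by rw [hdwc] at hlen; simpa using hlen
      have hempty : (((pt.zip st).map (fun q => q.1 + q.2 * D)).drop tw.length).isEmpty = true := by
        rw [List.isEmpty_iff, List.drop_eq_nil_iff]
        simp [htwl, hllen]
      rw [if_pos hempty]
      have hall : ∀ d ∈ l, d ≤ D := by
        intro d hd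
        rw [← htd, hdwc, List.append_nil] at hd
        exact hltw d hd
      have : groupGo ans D 1 l = groupGo ans D (1 + l.length) [] := by
        conv_lhs => rw [← List.append_nil l]
        exact groupGo_skip l [] ans D 1 hall
      rw [this]
      simp only [groupGo]
      congr 2
      rw [htwl]
      push_cast
      ring
    | cons d0 dw' =>
      have hd0 : ¬ d0 ≤ D := by
        have := dropWhile_head_false (fun d => decide (d ≤ D)) l d0 dw' (by rw [← hdw]; exact hdwc)
        simpa using this
      have htwlt : tw.length < l.length := by rw [hdwc] at hlen; simp at hlen; omega
      have hnempty : ¬ (((pt.zip st).map (fun q => q.1 + q.2 * D)).drop tw.length).isEmpty = true := by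
        rw [List.isEmpty_iff, List.drop_eq_nil_iff]
        simp only [List.length_map]
        omega
      rw [if_neg hnempty, hldw, zip_drop]
      have hmd : ((pt.zip st).drop tw.length).map (fun q => dayFn q.1 q.2) = d0 :: dw' := by
        rw [List.map_drop, ← hl, hdrop_l, hdwc]
      rw [zip_drop] at hmd
      cases hpd : pt.drop tw.length with
      | nil => rw [hpd] at hmd; simp at hmd
      | cons p2 pd' =>
        cases hsd : st.drop tw.length with
        | nil => rw [hsd] at hmd; simp at hmd
        | cons s2 sd' =>
          rw [hpd, hsd] at hmd
          simp only [List.zip_cons_cons, List.map_cons, List.cons.injEq] at hmd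
          simp only [List.zip_cons_cons, List.map_cons]
          obtain ⟨hd0eq, hdw'eq⟩ := hmd
          have hmempd : ∀ r ∈ (p2, s2) :: pd'.zip sd', r ∈ pt.zip st := by
            intro r hr
            have : r ∈ (pt.drop tw.length).zip (st.drop tw.length) := by
              rw [hpd, hsd, List.zip_cons_cons]; exact hr
            rw [← zip_drop] at this
            exact List.mem_of_mem_drop this
          have hposz : ∀ r ∈ (p2, s2) :: pd'.zip sd', 0 < r.2 := by
            intro r hr
            exact hpos r (by rw [hzc]; exact List.mem_cons_of_mem _ (hmempd r hr))
          have hs2 : 0 < s2 := hposz (p2, s2) (by simp)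
          have hpos2 : ∀ q ∈ ((p2 + s2 * D) :: (pd'.zip sd').map (fun q => q.1 + q.2 * D)).zip (s2 :: sd'), 0 < q.2 := by
            intro q hq
            rw [List.zip_cons_cons, zip_map_self] at hq
            rcases List.mem_cons.mp hq with h | h
            · rw [h]; exact hs2
            · obtain ⟨r, hr, rfl⟩ := List.mem_map.mp h
              exact hposz r (List.mem_cons_of_mem _ hr)
          have e1 : pt.length - tw.length = pd'.length + 1 := by
            have := congrArg List.length hpd
            simp at this; omega
          have e2 : st.length - tw.length = sd'.length + 1 := by
            have := congrArg List.length hsd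
            simp at this; omega
          have hfuel2 : min ((p2 + s2 * D) :: (pd'.zip sd').map (fun q => q.1 + q.2 * D)).length (s2 :: sd').length ≤ fuel := by
            simp only [List.length_cons, List.length_map, List.length_zip]
            simp only [List.length_cons] at hfuel
            omega
          rw [ih _ _ _ (p2 + s2 * D) s2 ((pd'.zip sd').map (fun q => q.1 + q.2 * D)) sd' rfl rfl hpos2 hfuel2]
          rw [zip_map_self, List.map_map]
          have hshift_map : (pd'.zip sd').map ((fun q => dayFn q.1 q.2) ∘ (fun q => (q.1 + q.2 * D, q.2))) = dw'.map (fun d => d - D) := by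
            rw [← hdw'eq, List.map_map]
            apply List.map_congr_left
            intro r hr
            simp only [Function.comp]
            exact dayFn_shift r.1 r.2 D (hposz r (List.mem_cons_of_mem _ hr))
          rw [hshift_map, dayFn_shift p2 s2 D hs2, hd0eq, groupGo_shift]
          rw [← htd, hdwc, groupGo_skip tw (d0 :: dw') ans D 1 hltw]
          simp only [groupGo]
          rw [if_neg hd0]
          have : ((tw.length + 1 : Nat) : Int) = 1 + (tw.length : Int) := by push_cast; ring
          rw [this]

-- ===== VERDICT (by name: the statement is the Claim_ definition above) =====
theorem solution_spec : Claim_equal_solution := by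
  intro ps ss _hdom hpre
  obtain ⟨hps, hss, hpos⟩ := hpre
  obtain ⟨p, pt, rfl⟩ := List.exists_cons_of_ne_nil hps
  obtain ⟨s, st, rfl⟩ := List.exists_cons_of_ne_nil hss
  unfold Spec_solution solution solution_alt
  rw [main_lemma (p :: pt).length (p :: pt) (s :: st) [] p s pt st rfl rfl hpos (by simp)]
  simp [List.zip]
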